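-- pv_equiv track=rewrite | github.com/hectcastro/aoc | 2024/9/2.py | find_free_segment
-- ===== SOURCE A (Python) =====
-- from typing import Optional
--
-- def find_free_segment(disk_blocks: list[int], file_length: int, before_index: int) -> Optional[int]:
--     """Find leftmost free segment of sufficient length before the given index."""
--     consecutive_free_blocks = 0
--     segment_start_index = None
--
--     for block_index in range(before_index):
--         if disk_blocks[block_index] == -1:
--             # Found a free block.
--             if segment_start_index is None:
--                 # Mark start of new free segment.
--                 segment_start_index = block_index
--
--             consecutive_free_blocks += 1
--
--             if consecutive_free_blocks == file_length:
--                 # Found segment large enough for file.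
--                 return segment_start_index
--         else:
--             # Hit a non-free block, reset our counters.
--             segment_start_index = None
--             consecutive_free_blocks = 0
--
--     return None
-- ===== SOURCE B (Python) =====
-- from typing import Optional
--
-- def find_free_segment(disk_blocks: list[int], file_length: int, before_index: int) -> Optional[int]:
--     """Find leftmost free segment of sufficient length before the given index."""
--     if file_length < 1 or before_index < 1:
--         # Nothing to place, or an empty search window.
--         return None
--     prefix = disk_blocks[:before_index]
--     # Stage 1: materialise every maximal free run of the prefix as (start, length).
--     runs = []
--     run_start = None
--     for i, block in enumerate(prefix):
--         if block == -1:
--             if run_start is None: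
--                 run_start = i
--         elif run_start is not None:
--             runs.append((run_start, i - run_start))
--             run_start = None
--     if run_start is not None:
--         runs.append((run_start, len(prefix) - run_start))
--     # Stage 2: return the start of the first run that is long enough.
--     for start, length in runs:
--         if length >= file_length:
--             return start
--     return None
-- ===== Notes on version B (the rewrite author's own statement) =====
-- stated objective: alternative
-- what changed: B is a staged decomposition: a first pass materialises every maximal free run of the sliced prefix as a (start, length) list, and a second pass returns the start of the first run whose length reaches file_length; A instead interleaves detection and test with a counter/segment-start state machine and an early return.
-- outside the precondition, e.g. on find_free_segment([-1], 1, 5): A returns 0, B returns 0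
import Mathlib
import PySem

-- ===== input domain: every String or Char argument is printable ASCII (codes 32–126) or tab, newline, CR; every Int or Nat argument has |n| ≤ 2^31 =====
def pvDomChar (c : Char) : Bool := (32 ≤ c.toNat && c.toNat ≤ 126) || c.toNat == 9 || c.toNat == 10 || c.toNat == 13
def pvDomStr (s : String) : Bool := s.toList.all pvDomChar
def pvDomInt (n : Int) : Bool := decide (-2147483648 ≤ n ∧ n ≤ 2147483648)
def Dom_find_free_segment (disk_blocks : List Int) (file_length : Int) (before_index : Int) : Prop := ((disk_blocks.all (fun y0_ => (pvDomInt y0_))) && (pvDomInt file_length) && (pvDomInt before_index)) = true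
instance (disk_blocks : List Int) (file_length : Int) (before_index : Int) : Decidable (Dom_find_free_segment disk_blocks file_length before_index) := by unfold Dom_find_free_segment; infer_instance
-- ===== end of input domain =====

-- B replaces A's interleaved counter/early-return state machine by two staged passes:
-- first materialise every maximal free run of the prefix as (start, length), then
-- return the first long-enough run's start (objective: alternative, same cost).

-- ===== PORT A =====
-- A's for-loop over range(before_index) with state (consecutive_free_blocks, segment_start_index);
-- disk_blocks[block_index] is ported as pyGetD (in range under Pre_, which excludes the IndexError inputs).
def pvALoop (d : List Int) (fl : Int) : List Int → Int → Option Int → Option Int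
  | [], _, _ => none
  | i :: rest, cnt, st =>
    if PySem.List.pyGetD d i 0 = -1 then
      let st' : Int := st.getD i
      let cnt' := cnt + 1
      if cnt' = fl then some st' else pvALoop d fl rest cnt' (some st')
    else pvALoop d fl rest 0 none

def find_free_segment (disk_blocks : List Int) (file_length : Int) (before_index : Int) : Option Int :=
  pvALoop disk_blocks file_length (PySem.List.pyRange 0 before_index 1) 0 none

-- ===== PORT B =====
-- stage 1 of Source B: the enumerate loop (index i, state run_start) collecting the
-- maximal free runs as (start, length); the [] cases are the final flush.
def pvRunsAux : List Int → Nat → Option Nat → List (Nat × Nat)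
  | [], _, none => []
  | [], i, some s => [(s, i - s)]
  | b :: rest, i, st =>
    if b = -1 then pvRunsAux rest (i + 1) (some (st.getD i))
    else
      match st with
      | none => pvRunsAux rest (i + 1) none
      | some s => (s, i - s) :: pvRunsAux rest (i + 1) none

-- stage 2 of Source B: first run whose length reaches file_length
def pvSearchRuns (fl : Int) : List (Nat × Nat) → Option Int
  | [] => none
  | (s, l) :: rest => if fl ≤ (l : Int) then some (s : Int) else pvSearchRuns fl rest

def find_free_segment_alt (disk_blocks : List Int) (file_length : Int) (before_index : Int) : Option Int :=
  if file_length < 1 ∨ before_index < 1 then none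
  else
    pvSearchRuns file_length
      (pvRunsAux (PySem.List.slice disk_blocks none (some before_index)) 0 none)

-- ===== PRECONDITION & SPEC =====
-- Pre_ excludes before_index > len(disk_blocks), on which A may raise IndexError
-- (A still returns there when an early free run suffices; B agrees there too — see cites).
def Pre_find_free_segment (disk_blocks : List Int) (file_length : Int) (before_index : Int) : Prop :=
  before_index ≤ (disk_blocks.length : Int)
instance (disk_blocks : List Int) (file_length : Int) (before_index : Int) : Decidable (Pre_find_free_segment disk_blocks file_length before_index) := by unfold Pre_find_free_segment; infer_instance

def pvWitness_find_free_segment : List Int × Int × Int := ([1, -1, -1, 5], 2, 4)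

def Spec_find_free_segment (disk_blocks : List Int) (file_length : Int) (before_index : Int) (out : Option Int) : Prop := out = find_free_segment_alt disk_blocks file_length before_index
instance (disk_blocks : List Int) (file_length : Int) (before_index : Int) (out : Option Int) : Decidable (Spec_find_free_segment disk_blocks file_length before_index out) := by unfold Spec_find_free_segment; infer_instance

-- ===== CLAIM (what is proved, stated in full; the proofs are below) =====
def Claim_equal_find_free_segment : Prop := ∀ (disk_blocks : List Int) (file_length : Int) (before_index : Int), Dom_find_free_segment disk_blocks file_length before_index → Pre_find_free_segment disk_blocks file_length before_index → Spec_find_free_segment disk_blocks file_length before_index (find_free_segment disk_blocks file_length before_index)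

-- ===== LEMMAS AND PROOFS =====

-- If file_length < 1, A's counter (kept ≥ 0) never hits it, so A returns none.
theorem aloop_none_of_fl_lt_one (d : List Int) (fl : Int) (hfl : fl < 1) :
    ∀ (idxs : List Int) (cnt : Int) (st : Option Int), 0 ≤ cnt →
      pvALoop d fl idxs cnt st = none := by
  intro idxs
  induction idxs with
  | nil => intro cnt st _; rfl
  | cons i rest ih =>
    intro cnt st hcnt
    simp only [pvALoop]
    split_ifs with h1 h2
    · omega
    · exact ih (cnt + 1) _ (by omega)
    · exact ih 0 none le_rfl

-- end of the maximal free run starting at j (proof device, shared by both sides)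
def pvRunEnd (p : List Int) (j : Nat) : Nat :=
  if h : j < p.length then
    if p[j] = -1 then pvRunEnd p (j + 1) else j
  else j
termination_by p.length - j
decreasing_by omega

theorem le_pvRunEnd (p : List Int) (j : Nat) : j ≤ pvRunEnd p j := by
  rw [pvRunEnd]
  split_ifs with h1 h2
  · have := le_pvRunEnd p (j + 1); omega
  · exact Nat.le_refl j
  · exact Nat.le_refl j
termination_by p.length - j
decreasing_by omega

theorem pvRunEnd_le_length (p : List Int) (j : Nat) (hj : j ≤ p.length) :
    pvRunEnd p j ≤ p.length := by
  rw [pvRunEnd]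
  split_ifs with h1 h2
  · exact pvRunEnd_le_length p (j + 1) (by omega)
  · exact hj
  · exact hj
termination_by p.length - j
decreasing_by omega

theorem pvRunEnd_stop (p : List Int) (j : Nat) (h : pvRunEnd p j < p.length) :
    p.getD (pvRunEnd p j) 0 ≠ -1 := by
  by_cases h1 : j < p.length
  · by_cases h2 : p[j]'h1 = -1
    · have e : pvRunEnd p j = pvRunEnd p (j + 1) := by rw [pvRunEnd]; simp [h1, h2]
      rw [e] at h ⊢
      exact pvRunEnd_stop p (j + 1) h
    · have e : pvRunEnd p j = j := by rw [pvRunEnd]; simp [h1, h2]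
      rw [e, List.getD_eq_getElem _ _ h1]
      exact h2
  · have e : pvRunEnd p j = j := by rw [pvRunEnd]; simp [h1]
    rw [e] at h
    omega
termination_by p.length - j
decreasing_by omega

theorem pvRunEnd_free (p : List Int) (j : Nat) :
    ∀ k, j ≤ k → k < pvRunEnd p j → p.getD k 0 = -1 := by
  intro k hjk hk
  by_cases h1 : j < p.length
  · by_cases h2 : p[j]'h1 = -1
    · have e : pvRunEnd p j = pvRunEnd p (j + 1) := by rw [pvRunEnd]; simp [h1, h2]
      rcases Nat.eq_or_lt_of_le hjk with rfl | hlt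
      · rw [List.getD_eq_getElem _ _ h1]; exact h2
      · rw [e] at hk
        exact pvRunEnd_free p (j + 1) k hlt hk
    · have e : pvRunEnd p j = j := by rw [pvRunEnd]; simp [h1, h2]
      omega
  · have e : pvRunEnd p j = j := by rw [pvRunEnd]; simp [h1]
    omega
termination_by p.length - j
decreasing_by omega

-- bridge: inside the prefix, A's pyGetD read is B's prefix element
theorem pyGetD_take (d : List Int) (n k : Nat) (hk : k < n) (hn : n ≤ d.length) :
    PySem.List.pyGetD d (k : Int) 0 = (d.take n).getD k 0 := by
  rw [PySem.List.pyGetD_natCast]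
  have hkd : k < d.length := by omega
  have hkt : k < (d.take n).length := by simp; omega
  rw [List.getD_eq_getElem d 0 hkd, List.getD_eq_getElem _ 0 hkt]
  simp [List.getElem_take]

-- A consuming a block of m free cells starting at i, with counter cnt and a set start s
theorem aloop_run (d : List Int) (fl : Int) (n : Nat) (hn : n ≤ d.length) :
    ∀ (m i : Nat) (cnt s : Int), 0 ≤ cnt → cnt < fl → i + m ≤ n →
      (∀ k, k < m → (d.take n).getD (i + k) 0 = -1) →
      pvALoop d fl (PySem.List.pyRange (i : Int) (n : Int) 1) cnt (some s) =
        if fl ≤ cnt + m then some s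
        else pvALoop d fl (PySem.List.pyRange ((i + m : Nat) : Int) (n : Int) 1) (cnt + m) (some s) := by
  intro m
  induction m with
  | zero =>
    intro i cnt s h0 hcnt him hfree
    rw [if_neg (by push_cast; omega)]
    norm_num
  | succ m ih =>
    intro i cnt s h0 hcnt him hfree
    have hin : (i : Int) < (n : Int) := by exact_mod_cast (by omega : i < n)
    rw [PySem.List.pyRange_one_cons hin]
    have hfi : PySem.List.pyGetD d (i : Int) 0 = -1 := by
      rw [pyGetD_take d n i (by omega) hn]
      simpa using hfree 0 (by omega)
    simp only [pvALoop, hfi, if_true, Option.getD_some]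
    split_ifs with hfl1 hc2 hc2
    · rfl
    · omega
    · have hrec := ih (i + 1) (cnt + 1) s (by omega) (by omega) (by omega)
        (fun k hk => by
          have := hfree (k + 1) (by omega)
          convert this using 2
          omega)
      rw [show ((i : Int) + 1) = ((i + 1 : Nat) : Int) by push_cast; ring, hrec,
        if_pos (by omega : fl ≤ cnt + 1 + (m : Int))]
    · have hrec := ih (i + 1) (cnt + 1) s (by omega) (by omega) (by omega)
        (fun k hk => by
          have := hfree (k + 1) (by omega)
          convert this using 2
          omega)
      rw [show ((i : Int) + 1) = ((i + 1 : Nat) : Int) by push_cast; ring, hrec,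
        if_neg (by omega : ¬ fl ≤ cnt + 1 + (m : Int))]
      rw [show i + 1 + m = i + (m + 1) from by omega]
      congr 1
      push_cast
      ring

-- stage 1 with an open run (start s): it closes exactly at pvRunEnd
theorem runs_closed (p : List Int) : ∀ (i s : Nat), i ≤ p.length →
    pvRunsAux (p.drop i) i (some s) =
      if pvRunEnd p i < p.length
      then (s, pvRunEnd p i - s) :: pvRunsAux (p.drop (pvRunEnd p i + 1)) (pvRunEnd p i + 1) none
      else [(s, p.length - s)] := by
  intro i s hi
  rcases Nat.eq_or_lt_of_le hi with rfl | hlt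
  · have e : pvRunEnd p p.length = p.length := by rw [pvRunEnd]; simp
    rw [e, if_neg (by omega), List.drop_length]
    rfl
  · rw [List.drop_eq_getElem_cons hlt]
    by_cases h2 : p[i]'hlt = -1
    · have e : pvRunEnd p i = pvRunEnd p (i + 1) := by rw [pvRunEnd]; simp [hlt, h2]
      simp only [pvRunsAux, h2, if_true, Option.getD_some]
      rw [e]
      exact runs_closed p (i + 1) s (by omega)
    · have e : pvRunEnd p i = i := by rw [pvRunEnd]; simp [hlt, h2]
      simp only [pvRunsAux, h2]
      rw [e, if_pos hlt]
      simp
termination_by i _ _ => p.length - i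
decreasing_by omega

-- the central correspondence, from any position i of the prefix with fresh state
theorem main_loop (d : List Int) (fl : Int) (n : Nat) (hn : n ≤ d.length) (hfl : 1 ≤ fl) :
    ∀ i, i ≤ n →
      pvALoop d fl (PySem.List.pyRange (i : Int) (n : Int) 1) 0 none =
        pvSearchRuns fl (pvRunsAux ((d.take n).drop i) i none) := by
  intro i hi
  have hplen : (d.take n).length = n := by simp; omega
  rcases Nat.eq_or_lt_of_le hi with rfl | hlt
  · rw [PySem.List.pyRange_one_eq_nil (le_refl _)]
    rw [show (d.take i).drop i = [] from by
      apply List.drop_eq_nil_of_le; rw [List.length_take]; omega]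
    rfl
  · have hin : (i : Int) < (n : Int) := by exact_mod_cast hlt
    have hilen : i < (d.take n).length := by omega
    rw [PySem.List.pyRange_one_cons hin, List.drop_eq_getElem_cons hilen]
    by_cases hv : (d.take n)[i]'hilen = -1
    · -- free cell: A enters the run; B's stage 1 opens it and closes it at its end
      have hgd : PySem.List.pyGetD d (i : Int) 0 = -1 := by
        rw [pyGetD_take d n i hlt hn, List.getD_eq_getElem _ _ hilen]
        exact hv
      simp only [pvALoop, hgd, if_true, Option.getD_none, pvRunsAux, hv, Option.getD_none]
      rw [runs_closed (d.take n) (i + 1) i (by omega), hplen]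
      set j := pvRunEnd (d.take n) (i + 1) with hj
      have hj1 : i + 1 ≤ j := le_pvRunEnd _ _
      have hjn : j ≤ n := by
        have := pvRunEnd_le_length (d.take n) (i + 1) (by omega)
        omega
      have hrun : ∀ k, k < j - (i + 1) → (d.take n).getD ((i + 1) + k) 0 = -1 := by
        intro k hk
        exact pvRunEnd_free (d.take n) (i + 1) _ (by omega) (by omega)
      have hcast : ((j - i : Nat) : Int) = (j : Int) - (i : Int) :=
        Nat.cast_sub (by omega)
      by_cases hfl1 : (0 : Int) + 1 = fl
      · -- fl = 1: A returns at once; B's first run has length ≥ 1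
        rw [if_pos hfl1]
        by_cases hjlt : j < n
        · rw [if_pos hjlt]
          simp only [pvSearchRuns]
          rw [if_pos (by rw [Nat.cast_sub (by omega : i ≤ j)]; omega)]
        · rw [if_neg hjlt]
          simp only [pvSearchRuns]
          rw [if_pos (by rw [Nat.cast_sub (by omega : i ≤ n)]; omega)]
      · rw [if_neg hfl1, show ((0 : Int) + 1) = (1 : Int) from by norm_num]
        have harun := aloop_run d fl n hn (j - (i + 1)) (i + 1) 1 (i : Int)
          (by omega) (by omega) (by omega) hrun
        rw [show ((i : Int) + 1) = ((i + 1 : Nat) : Int) by push_cast; ring]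
        rw [harun]
        by_cases hjlt : j < n
        · rw [if_pos hjlt]
          simp only [pvSearchRuns]
          by_cases hbig : fl ≤ ((j - i : Nat) : Int)
          · rw [if_pos hbig,
              if_pos (by rw [Nat.cast_sub (by omega : i + 1 ≤ j)] at *; omega)]
          · rw [if_neg hbig,
              if_neg (by rw [Nat.cast_sub (by omega : i + 1 ≤ j)] at *; omega)]
            rw [show i + 1 + (j - (i + 1)) = j from by omega]
            -- A is at j (occupied): it resets there and continues from j + 1
            have hjin : (j : Int) < (n : Int) := by exact_mod_cast hjlt
            have hjlen : j < (d.take n).length := by omega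
            have hstop : (d.take n).getD j 0 ≠ -1 := pvRunEnd_stop (d.take n) (i + 1) (by omega)
            have hgdj : PySem.List.pyGetD d (j : Int) 0 ≠ -1 := by
              rw [pyGetD_take d n j hjlt hn]
              exact hstop
            rw [PySem.List.pyRange_one_cons hjin]
            simp only [pvALoop, if_neg hgdj]
            rw [show ((j : Int) + 1) = ((j + 1 : Nat) : Int) by push_cast; ring]
            exact main_loop d fl n hn hfl (j + 1) (by omega)
        · rw [if_neg hjlt]
          simp only [pvSearchRuns]
          have hje : j = n := by omega
          by_cases hbig : fl ≤ ((n - i : Nat) : Int)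
          · rw [if_pos hbig,
              if_pos (by rw [Nat.cast_sub (by omega : i + 1 ≤ j)] at *; omega)]
          · rw [if_neg hbig,
              if_neg (by rw [Nat.cast_sub (by omega : i + 1 ≤ j)] at *; omega)]
            rw [show i + 1 + (j - (i + 1)) = j from by omega, hje,
              PySem.List.pyRange_one_eq_nil (le_refl _)]
            rfl
    · -- occupied cell: both step one cell with fresh state
      have hgd : PySem.List.pyGetD d (i : Int) 0 ≠ -1 := by
        rw [pyGetD_take d n i hlt hn, List.getD_eq_getElem _ _ hilen]
        exact hv
      simp only [pvALoop, if_neg hgd, pvRunsAux, hv]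
      rw [show ((i : Int) + 1) = ((i + 1 : Nat) : Int) by push_cast; ring]
      exact main_loop d fl n hn hfl (i + 1) (by omega)
termination_by i => n - i
decreasing_by all_goals omega

-- ===== VERDICT (by name: the statement is the Claim_ definition above) =====
theorem find_free_segment_spec : Claim_equal_find_free_segment := by
  intro d fl bi _ hpre
  unfold Spec_find_free_segment find_free_segment find_free_segment_alt
  by_cases hfl : fl < 1
  · rw [if_pos (Or.inl hfl)]
    exact aloop_none_of_fl_lt_one d fl hfl _ 0 none le_rfl
  · by_cases hbi : bi < 1
    · rw [if_pos (Or.inr hbi)]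
      rw [PySem.List.pyRange_one_eq_nil (by omega)]
      rfl
    · rw [if_neg (by tauto)]
      have hbi0 : 0 ≤ bi := by omega
      have hncast : ((bi.toNat : Nat) : Int) = bi := Int.toNat_of_nonneg hbi0
      have hn : bi.toNat ≤ d.length := by
        unfold Pre_find_free_segment at hpre; omega
      have hm := main_loop d fl bi.toNat hn (by omega) 0 (by omega)
      rw [PySem.List.slice_to d hbi0]
      rw [show bi = ((bi.toNat : Nat) : Int) from hncast.symm]
      simp only [Int.toNat_natCast]
      simpa using hm
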